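-- pv_equiv track=rewrite | github.com/a-nxwball/Portafolio-ED1 | Grafos.py | nodo_mayor_grado
-- ===== SOURCE A (Python) =====
-- def nodo_mayor_grado(grafo):
--     """
--     max_nodo: nodo con mayor grado
--     max_grado: grado del nodo con mayor grado
--
--     Por que el maximo grado es -1?:
--     R. Porque el grado de un nodo no puede ser negativo. Al final, si no se encuentra un nodo con grado mayor a -1, significa que el grafo está vacío o no tiene nodos. Por lo tanto, se inicializa en -1 para que cualquier grado encontrado sea mayor que -1 y se pueda actualizar el nodo con mayor grado. Si el grafo está vacío, max_nodo seguirá siendo None y max_grado seguirá siendo -1.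
--
--     Se busca el nodo con mayor grado ya que esto puede ser útil en diversas aplicaciones, como en redes sociales, donde se desea identificar al usuario más conectado o influyente. También puede ser útil en mapas, donde se desea identificar la ciudad más conectada; o en transporte, donde se desea identificar la estación más concurrida.
--     """
--     max_nodo = None
--     max_grado = -1
--     for nodo in grafo:
--         grado = len(grafo[nodo])
--         if grado > max_grado:
--             max_grado = grado
--             max_nodo = nodo
--     return max_nodo, max_grado
-- ===== SOURCE B (Python) =====
-- def nodo_mayor_grado(grafo):
--     if not grafo:
--         return None, -1
--     orden = sorted(grafo, key=lambda n: len(grafo[n]), reverse=True)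
--     max_nodo = orden[0]
--     return max_nodo, len(grafo[max_nodo])
-- ===== Notes on version B (the rewrite author's own statement) =====
-- stated objective: alternative
-- what changed: Replaces the accumulator scan tracking (max_nodo, max_grado) by a stable descending sort of the nodes by degree and picking the first element (ties resolve to the first-encountered node exactly as A's strict > does).
-- outside the precondition, e.g. on nodo_mayor_grado({}): A returns (None, -1), B returns (None, -1)
import Mathlib
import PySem

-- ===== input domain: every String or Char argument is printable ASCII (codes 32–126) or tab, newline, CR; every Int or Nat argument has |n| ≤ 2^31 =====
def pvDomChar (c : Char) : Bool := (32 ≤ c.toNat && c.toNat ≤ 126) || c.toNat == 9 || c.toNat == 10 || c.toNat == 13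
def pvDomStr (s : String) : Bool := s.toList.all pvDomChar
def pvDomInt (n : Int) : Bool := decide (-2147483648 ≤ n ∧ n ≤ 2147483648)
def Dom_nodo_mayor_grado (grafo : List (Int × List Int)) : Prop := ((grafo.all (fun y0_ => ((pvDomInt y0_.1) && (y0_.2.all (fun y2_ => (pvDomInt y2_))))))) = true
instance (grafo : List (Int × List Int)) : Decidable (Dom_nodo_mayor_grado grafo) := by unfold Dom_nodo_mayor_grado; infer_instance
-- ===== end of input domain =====

-- B replaces A's running-maximum scan by a stable descending sort by degree and taking the
-- first node (objective: alternative). Equivalence is about the RETURN value; no mutation occurs.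

-- ===== PORT A =====
-- 'for nodo in grafo' iterates the dict's keys in insertion order; with distinct keys that is
-- grafo.map Prod.fst. max_nodo = None is rendered by the sentinel 0: Pre_ excludes the empty
-- graph, the only input on which the sentinel could escape.
def nodo_mayor_grado (grafo : List (Int × List Int)) : Int × Int :=
  (grafo.map Prod.fst).foldl
    (fun acc nodo =>
      let grado : Int := (PySem.Dict.getD ⟨grafo⟩ nodo []).length
      if grado > acc.2 then (nodo, grado) else acc)
    (0, -1)

-- ===== PORT B =====
-- Source B: guard the empty graph, sort the nodes by degree descending (stable), take the first.
-- The [] branch corresponds to Source B's 'return None, -1'; unreachable under Pre_.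
def nodo_mayor_grado_alt (grafo : List (Int × List Int)) : Int × Int :=
  match PySem.List.sorted (grafo.map Prod.fst)
          (fun n => ((PySem.Dict.getD ⟨grafo⟩ n []).length : Int)) true with
  | [] => (0, -1)
  | m :: _ => (m, ((PySem.Dict.getD ⟨grafo⟩ m []).length : Int))

-- ===== PRECONDITION & SPEC =====
-- Pre_ excludes the empty graph, where A returns (None, -1) — None is not a value of the declared
-- Int result type — and association lists with duplicate keys, which Python's dict constructor
-- collapses (keeping the last value), an accident of dict semantics not representable here.
def Pre_nodo_mayor_grado (grafo : List (Int × List Int)) : Prop :=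
  grafo ≠ [] ∧ (grafo.map Prod.fst).Nodup
instance (grafo : List (Int × List Int)) : Decidable (Pre_nodo_mayor_grado grafo) := by
  unfold Pre_nodo_mayor_grado; infer_instance

def pvWitness_nodo_mayor_grado : (List (Int × List Int)) := [(1, [2, 3]), (2, [1])]

def Spec_nodo_mayor_grado (grafo : List (Int × List Int)) (out : Int × Int) : Prop := out = nodo_mayor_grado_alt grafo
instance (grafo : List (Int × List Int)) (out : Int × Int) : Decidable (Spec_nodo_mayor_grado grafo out) := by unfold Spec_nodo_mayor_grado; infer_instance

-- ===== CLAIM (what is proved, stated in full; the proofs are below) =====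
def Claim_equal_nodo_mayor_grado : Prop := ∀ (grafo : List (Int × List Int)), Dom_nodo_mayor_grado grafo → Pre_nodo_mayor_grado grafo → Spec_nodo_mayor_grado grafo (nodo_mayor_grado grafo)

-- ===== LEMMAS AND PROOFS =====

-- Head of B's stable descending insertion sort, run from a nonempty accumulator, is the
-- left-fold first-strict-maximum of the remaining elements relative to the accumulator's head.
theorem pv_sortfold_head (f : Int → Int) :
    ∀ (ks : List Int) (y : Int) (ys : List Int),
      ∃ t, ks.foldl (fun a x => PySem.List.insertBy (fun a b => decide (f b < f a)) x a) (y :: ys)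
            = (ks.foldl (fun m k => if f m < f k then k else m) y) :: t := by
  intro ks
  induction ks with
  | nil => intro y ys; exact ⟨ys, rfl⟩
  | cons k ks ih =>
    intro y ys
    by_cases h : f y < f k
    · simpa [List.foldl, PySem.List.insertBy, h] using ih k (y :: ys)
    · simpa [List.foldl, PySem.List.insertBy, h] using ih y (PySem.List.insertBy (fun a b => decide (f b < f a)) k ys)

-- A's scan, once its accumulator is a real pair (m, f m), tracks exactly the node component.
theorem pv_scan_pair (f : Int → Int) :
    ∀ (ks : List Int) (m : Int),
      ks.foldl (fun (acc : Int × Int) nodo =>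
          let grado : Int := f nodo
          if grado > acc.2 then (nodo, grado) else acc) (m, f m)
        = (ks.foldl (fun m k => if f m < f k then k else m) m,
           f (ks.foldl (fun m k => if f m < f k then k else m) m)) := by
  intro ks
  induction ks with
  | nil => intro m; rfl
  | cons k ks ih =>
    intro m
    by_cases h : f m < f k
    · simpa [List.foldl, h, gt_iff_lt] using ih k
    · simpa [List.foldl, h, gt_iff_lt] using ih m

-- ===== VERDICT (by name: the statement is the Claim_ definition above) =====
theorem nodo_mayor_grado_spec : Claim_equal_nodo_mayor_grado := by
  intro grafo _ hpre
  unfold Spec_nodo_mayor_grado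
  obtain ⟨hne, _⟩ := hpre
  set f : Int → Int := fun n => ((PySem.Dict.getD ⟨grafo⟩ n []).length : Int) with hf
  obtain ⟨k, rest, hks⟩ : ∃ k rest, grafo.map Prod.fst = k :: rest := by
    cases grafo with
    | nil => exact absurd rfl hne
    | cons p ps => exact ⟨p.1, ps.map Prod.fst, rfl⟩
  -- evaluate A
  have hA : nodo_mayor_grado grafo
      = (rest.foldl (fun m k => if f m < f k then k else m) k,
         f (rest.foldl (fun m k => if f m < f k then k else m) k)) := by
    have hfirst : ((f k : Int) > (-1 : Int)) := by
      have : (0 : Int) ≤ f k := by simp [hf]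
      omega
    unfold nodo_mayor_grado
    rw [hks]
    simp only [List.foldl, hf]
    rw [if_pos (by simpa [hf, gt_iff_lt] using hfirst)]
    exact pv_scan_pair f rest k
  -- evaluate B
  obtain ⟨t, ht⟩ := pv_sortfold_head f rest k []
  have hsorted : PySem.List.sorted (grafo.map Prod.fst) f true
      = (rest.foldl (fun m k => if f m < f k then k else m) k) :: t := by
    rw [PySem.List.sorted_rev_eq_foldl_insertBy, hks]
    simpa [List.foldl, PySem.List.insertBy] using ht
  have hB : nodo_mayor_grado_alt grafo
      = (rest.foldl (fun m k => if f m < f k then k else m) k,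
         f (rest.foldl (fun m k => if f m < f k then k else m) k)) := by
    unfold nodo_mayor_grado_alt
    rw [show (fun n => ((PySem.Dict.getD ⟨grafo⟩ n []).length : Int)) = f from rfl, hsorted]
  rw [hA, hB]
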